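-- pv_equiv track=rewrite | github.com/ADoublLEN/Meeseeks | src_code/rule_utils_eng/yayun.py | extract_rhyme_endings
-- ===== SOURCE A (Python) =====
-- def get_rhyme_key_from_last_vowel(word, vowels):
--     """
--     统一的韵脚提取方法：从最后一个元音到单词尾部
--     """
--     if not word:
--         return None
--
--     word = word.lower().strip()
--
--     # 找到最后一个元音的位置
--     last_vowel_pos = -1
--     for i in range(len(word) - 1, -1, -1):
--         if word[i] in vowels:
--             last_vowel_pos = i
--             break
--
--     if last_vowel_pos == -1:
--         # 没有元音，返回最后2个字符
--         return word[-2:] if len(word) >= 2 else word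
--
--     # 从最后一个元音到单词结尾
--     return word[last_vowel_pos:]
--
-- def get_rhyme_key(word):
--     """
--     英文单词的押韵键值提取（使用统一逻辑）
--     """
--     vowels = 'aeiou'
--     return get_rhyme_key_from_last_vowel(word, vowels)
--
-- def extract_rhyme_endings(sentences):
--     """
--     提取每个句子最后一个单词的押韵键值
--     """
--     rhyme_keys = []
--
--     for sentence in sentences:
--         if sentence:
--             words = sentence.split()
--             if words:
--                 last_word = words[-1].lower()
--                 rhyme_key = get_rhyme_key(last_word)
--                 if rhyme_key:
--                     rhyme_keys.append(rhyme_key)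
--
--     return rhyme_keys
-- ===== SOURCE B (Python) =====
-- import re
--
--
-- def _rhyme_key(word):
--     if not word:
--         return None
--     w = word.lower().strip()
--     m = re.search(r'[aeiou][^aeiou]*$', w)
--     if m:
--         return m.group()
--     # no vowel: last 2 characters (or the whole word if shorter)
--     return w[-2:] if len(w) >= 2 else w
--
--
-- def extract_rhyme_endings(sentences):
--     rhyme_keys = []
--     for sentence in sentences:
--         words = sentence.split()
--         if words:
--             key = _rhyme_key(words[-1].lower())
--             if key:
--                 rhyme_keys.append(key)
--     return rhyme_keys
-- ===== Notes on version B (the rewrite author's own statement) =====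
-- stated objective: idiomatic
-- what changed: B finds the rhyme ending with a single regex search re.search(r'[aeiou][^aeiou]*$', w) instead of A's manual backward index scan for the last vowel, and drops the redundant empty-sentence and empty-word guards.
import Mathlib
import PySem

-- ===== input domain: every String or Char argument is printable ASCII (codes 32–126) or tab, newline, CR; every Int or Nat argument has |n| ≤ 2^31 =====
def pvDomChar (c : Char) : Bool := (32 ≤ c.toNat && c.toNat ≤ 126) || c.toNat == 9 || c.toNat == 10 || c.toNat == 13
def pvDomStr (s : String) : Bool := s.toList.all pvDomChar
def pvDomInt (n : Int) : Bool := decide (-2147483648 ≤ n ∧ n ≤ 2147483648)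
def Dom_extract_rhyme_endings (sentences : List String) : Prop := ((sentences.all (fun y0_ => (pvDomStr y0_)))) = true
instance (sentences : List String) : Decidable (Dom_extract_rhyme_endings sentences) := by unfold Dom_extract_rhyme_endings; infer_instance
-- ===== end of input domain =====

-- B replaces A's manual backward index scan for the last vowel by a single regex search
-- (re.search(r'[aeiou][^aeiou]*$', w)) and drops the redundant empty-sentence guard (idiomatic; same cost).

-- ===== PORT A =====
-- the backward loop 'for i in range(len(word)-1, -1, -1): if word[i] in vowels: last_vowel_pos = i; break';
-- 'word[i] in vowels' is one-char substring membership = character membership; i is always in range, so the pyGetD default is dead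
def pvGrkLoop (w vowels : List Char) : List Int → Int
  | [] => -1
  | i :: rest => if vowels.contains (PySem.List.pyGetD w i ' ') then i else pvGrkLoop w vowels rest

def get_rhyme_key_from_last_vowel (word : String) (vowels : String) : Option String :=
  if word.toList = [] then none
  else
    let w := PySem.Chars.strip (PySem.Chars.lower word.toList)
    let last_vowel_pos := pvGrkLoop w vowels.toList (PySem.List.pyRange ((w.length : Int) - 1) (-1) (-1))
    if last_vowel_pos = -1 then
      if 2 ≤ (w.length : Int) then some (String.ofList (PySem.List.slice w (some (-2)) none))
      else some (String.ofList w)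
    else some (String.ofList (PySem.List.slice w (some last_vowel_pos) none))

def get_rhyme_key (word : String) : Option String :=
  get_rhyme_key_from_last_vowel word "aeiou"

def extract_rhyme_endings (sentences : List String) : List String :=
  sentences.foldl (fun rhyme_keys sentence =>
    if sentence.toList = [] then rhyme_keys
    else
      let words := PySem.Chars.split₀ sentence.toList
      if words = [] then rhyme_keys
      else
        -- words[-1] with words ≠ []: index always in range, the default is dead
        let last_word := String.ofList (PySem.Chars.lower (PySem.List.pyGetD words (-1) []))
        match get_rhyme_key last_word with
        | none => rhyme_keys
        | some k => if k.toList = [] then rhyme_keys else rhyme_keys ++ [k]) []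

-- ===== PORT B =====
-- hand port of re.search(r'[aeiou][^aeiou]*$', w): exactly the suffix of w starting at its
-- last vowel, none iff w has no vowel (exact for this anchored pattern)
def pvReSearchLastVowel (w : List Char) : Option (List Char) :=
  let t := w.reverse.takeWhile (fun c => !("aeiou".toList.contains c))
  if t.length = w.length then none else some (w.drop (w.length - t.length - 1))

def pvRhymeKeyB (word : String) : Option String :=
  if word.toList = [] then none
  else
    let w := PySem.Chars.strip (PySem.Chars.lower word.toList)
    match pvReSearchLastVowel w with
    | some m => some (String.ofList m)
    | none =>
      if 2 ≤ (w.length : Int) then some (String.ofList (PySem.List.slice w (some (-2)) none))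
      else some (String.ofList w)

def extract_rhyme_endings_alt (sentences : List String) : List String :=
  sentences.foldl (fun acc sentence =>
    let words := PySem.Chars.split₀ sentence.toList
    if words = [] then acc
    else
      match pvRhymeKeyB (String.ofList (PySem.Chars.lower (PySem.List.pyGetD words (-1) []))) with
      | none => acc
      | some k => if k.toList = [] then acc else acc ++ [k]) []

-- ===== PRECONDITION & SPEC =====
def Spec_extract_rhyme_endings (sentences : List String) (out : List String) : Prop := out = extract_rhyme_endings_alt sentences
instance (sentences : List String) (out : List String) : Decidable (Spec_extract_rhyme_endings sentences out) := by unfold Spec_extract_rhyme_endings; infer_instance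

-- ===== CLAIM (what is proved, stated in full; the proofs are below) =====
def Claim_equal_extract_rhyme_endings : Prop := ∀ (sentences : List String), Dom_extract_rhyme_endings sentences → Spec_extract_rhyme_endings sentences (extract_rhyme_endings sentences)

-- ===== LEMMAS AND PROOFS =====

-- A's backward loop over the indices k-1, …, 0 computes exactly the position of the last vowel
-- of w.take k (phrased through the takeWhile on the reversed prefix), or -1 when there is none.
lemma pvGrkLoop_take (w v : List Char) : ∀ (k : Nat), k ≤ w.length →
    pvGrkLoop w v (PySem.List.pyRange ((k : Int) - 1) (-1) (-1)) =
      (if ((w.take k).reverse.takeWhile (fun c => !(v.contains c))).length = k then -1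
       else (k : Int) - (((w.take k).reverse.takeWhile (fun c => !(v.contains c))).length : Int) - 1) := by
  intro k
  induction k with
  | zero =>
      intro _
      rw [PySem.List.pyRange_neg_one_eq_nil (by omega)]
      simp [pvGrkLoop]
  | succ k ih =>
      intro hk
      have hk' : k < w.length := by omega
      have h1 : ((k + 1 : Nat) : Int) - 1 = (k : Int) := by push_cast; ring
      rw [h1, PySem.List.pyRange_neg_one_cons (by omega)]
      have hget : w[k]? = some w[k] := List.getElem?_eq_getElem hk'
      rw [List.take_add_one, hget]
      simp only [Option.toList_some, List.reverse_append, List.reverse_cons, List.reverse_nil,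
        List.nil_append, List.singleton_append, List.takeWhile_cons]
      have hgd : PySem.List.pyGetD w (k : Int) ' ' = w[k] := by
        rw [PySem.List.pyGetD_eq_getElem w ' ' (by omega) (by exact_mod_cast hk')]
        simp
      show (if v.contains (PySem.List.pyGetD w (k : Int) ' ') = true then (k : Int)
            else pvGrkLoop w v (PySem.List.pyRange ((k : Int) - 1) (-1) (-1))) = _
      rw [hgd]
      by_cases hv : v.contains w[k] = true
      · rw [if_pos hv]
        simp only [hv, Bool.not_true, Bool.false_eq_true, if_false, List.length_nil]
        rw [if_neg (by omega)]
        omega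
      · rw [if_neg hv]
        have hv' : v.contains w[k] = false := by simpa using hv
        simp only [hv', Bool.not_false, if_true, List.length_cons]
        rw [ih (by omega)]
        by_cases ht : ((w.take k).reverse.takeWhile (fun c => !(v.contains c))).length = k
        · rw [if_pos ht, if_pos (by omega)]
        · rw [if_neg ht, if_neg (by omega)]
          omega

-- the two rhyme-key helpers agree on every word
lemma pvHelper_eq (word : String) : get_rhyme_key word = pvRhymeKeyB word := by
  unfold get_rhyme_key get_rhyme_key_from_last_vowel pvRhymeKeyB pvReSearchLastVowel
  by_cases h0 : word.toList = []
  · simp [h0]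
  · rw [if_neg h0, if_neg h0]
    simp only []
    generalize PySem.Chars.strip (PySem.Chars.lower word.toList) = w
    rw [pvGrkLoop_take w ("aeiou".toList) w.length le_rfl, List.take_length]
    have htle : (w.reverse.takeWhile (fun c => !(("aeiou".toList).contains c))).length ≤ w.length := by
      calc (w.reverse.takeWhile (fun c => !(("aeiou".toList).contains c))).length
          ≤ w.reverse.length := (List.takeWhile_prefix _).length_le
        _ = w.length := List.length_reverse
    by_cases hcase : (w.reverse.takeWhile (fun c => !(("aeiou".toList).contains c))).length = w.length
    · rw [if_pos hcase, if_pos rfl, if_pos hcase]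
    · rw [if_neg hcase, if_neg (by omega), if_neg hcase]
      show some _ = some _
      congr 1
      rw [PySem.List.slice_some_none]
      have hlt : (w.reverse.takeWhile (fun c => !(("aeiou".toList).contains c))).length < w.length :=
        lt_of_le_of_ne htle hcase
      have hcast : ((w.length : Int) - ((w.reverse.takeWhile (fun c => !(("aeiou".toList).contains c))).length : Int) - 1)
          = ((w.length - (w.reverse.takeWhile (fun c => !(("aeiou".toList).contains c))).length - 1 : Nat) : Int) := by
        omega
      rw [hcast, PySem.List.clampIdx_natCast, Nat.min_eq_left (by omega)]

-- the two per-sentence step functions of the folds agree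
lemma pvStep_eq (acc : List String) (s : String) :
    (if s.toList = [] then acc
     else
       let words := PySem.Chars.split₀ s.toList
       if words = [] then acc
       else
         let last_word := String.ofList (PySem.Chars.lower (PySem.List.pyGetD words (-1) []))
         match get_rhyme_key last_word with
         | none => acc
         | some k => if k.toList = [] then acc else acc ++ [k]) =
    (let words := PySem.Chars.split₀ s.toList
     if words = [] then acc
     else
       match pvRhymeKeyB (String.ofList (PySem.Chars.lower (PySem.List.pyGetD words (-1) []))) with
       | none => acc
       | some k => if k.toList = [] then acc else acc ++ [k]) := by
  by_cases h0 : s.toList = []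
  · rw [if_pos h0]
    show _ = (let words := PySem.Chars.split₀ s.toList
              if words = [] then acc else _)
    rw [h0]
    rfl
  · rw [if_neg h0]
    simp only [pvHelper_eq]

-- ===== VERDICT (by name: the statement is the Claim_ definition above) =====
theorem extract_rhyme_endings_spec : Claim_equal_extract_rhyme_endings := by
  intro sentences _
  show extract_rhyme_endings sentences = extract_rhyme_endings_alt sentences
  unfold extract_rhyme_endings extract_rhyme_endings_alt
  congr 1
  funext acc s
  exact pvStep_eq acc s
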